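-- pv_equiv track=rewrite | github.com/TristanLee187/CPPython | Codeforces/CompetitionRounds/Misc/YetAnotherWalkingRobot.py | homosubstrings
-- ===== SOURCE A (Python) =====
-- def homosubstrings(s, c1, c2):
--     '''Returns a list of the lengths of the contiguous substrings of character c in string s'''
--     n=len(s)
--     spaces=[]
--     i=0
--     found=False
--     while i<n:
--         if s[i]!=c1 and s[i]!=c2:
--             spaces.append(i)
--             found=True
--         i+=1
--     tspaces=[]
--     if found:
--         i=1
--         if spaces[0]!=0:
--             tspaces.append(spaces[0])
--         while i<len(spaces):
--             if spaces[i]-spaces[i-1]-1!=0: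
--                 tspaces.append(spaces[i]-spaces[i-1]-1)
--             i+=1
--         if spaces[-1]!=n-1 and n-1-spaces[-1]!=0:
--             tspaces.append(n-1-spaces[-1])
--     elif i!=0:
--         tspaces.append(i)
--     return tspaces
-- ===== SOURCE B (Python) =====
-- def homosubstrings(s, c1, c2):
--     '''Returns a list of the lengths of the contiguous substrings of character c in string s'''
--     res = []
--     run = 0
--     for ch in s:
--         if ch == c1 or ch == c2:
--             run += 1
--         else:
--             if run > 0:
--                 res.append(run)
--             run = 0
--     if run > 0:
--         res.append(run)
--     return res
-- ===== Notes on version B (the rewrite author's own statement) =====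
-- stated objective: simpler
-- what changed: Replaced A's two-pass structure (collect all separator positions into a list, then compute and filter pairwise gaps with separate head/middle/tail cases) by one left-to-right pass with a single running counter flushed at separators and at the end.
import Mathlib
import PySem

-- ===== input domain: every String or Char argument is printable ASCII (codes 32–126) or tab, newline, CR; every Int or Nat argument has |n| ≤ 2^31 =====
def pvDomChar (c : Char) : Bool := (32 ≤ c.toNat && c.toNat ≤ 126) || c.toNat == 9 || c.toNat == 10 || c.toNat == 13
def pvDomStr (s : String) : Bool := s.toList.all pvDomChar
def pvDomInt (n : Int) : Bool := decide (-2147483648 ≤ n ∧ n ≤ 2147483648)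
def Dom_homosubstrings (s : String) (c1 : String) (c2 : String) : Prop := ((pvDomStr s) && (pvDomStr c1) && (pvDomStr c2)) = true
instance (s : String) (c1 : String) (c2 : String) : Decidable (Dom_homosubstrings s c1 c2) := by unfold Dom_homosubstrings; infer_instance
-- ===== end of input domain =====

-- B changes A's two-pass gaps-between-separator-positions structure into a single pass
-- with one running counter (objective: simpler); same return value on every input.

-- ===== PORT A =====
-- first while loop: collect the indices of separator characters, tracking `found`
def hsSpacesLoop (c1 c2 : String) : List Char → Int → List Int → Bool → (List Int × Bool)
  | [], _, spaces, found => (spaces, found)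
  | ch :: t, i, spaces, found =>
    if [ch] ≠ c1.toList ∧ [ch] ≠ c2.toList then
      hsSpacesLoop c1 c2 t (i + 1) (spaces ++ [i]) true
    else
      hsSpacesLoop c1 c2 t (i + 1) spaces found

-- second while loop over spaces[1:], carrying spaces[i-1] as `prev`; also returns spaces[-1]
def hsGapLoop : Int → List Int → (List Int × Int)
  | prev, [] => ([], prev)
  | prev, x :: xs =>
    let r := hsGapLoop x xs
    ((if x - prev - 1 ≠ 0 then [x - prev - 1] else []) ++ r.1, r.2)

def homosubstrings (s : String) (c1 : String) (c2 : String) : List Int :=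
  let n : Int := (s.toList.length : Int)
  let p := hsSpacesLoop c1 c2 s.toList 0 [] false
  if p.2 then
    match p.1 with
    | [] => []   -- unreachable: found = true forces spaces nonempty
    | s0 :: rest =>
      let t0 : List Int := if s0 ≠ 0 then [s0] else []
      let g := hsGapLoop s0 rest
      t0 ++ g.1 ++ (if g.2 ≠ n - 1 ∧ n - 1 - g.2 ≠ 0 then [n - 1 - g.2] else [])
  else if n ≠ 0 then [n] else []

-- ===== PORT B =====
-- single pass: running counter, flushed at each separator and once at the end
def hsStep (c1 c2 : String) (st : List Int × Int) (ch : Char) : List Int × Int :=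
  if [ch] = c1.toList ∨ [ch] = c2.toList then
    (st.1, st.2 + 1)
  else
    (if st.2 > 0 then st.1 ++ [st.2] else st.1, 0)

def homosubstrings_alt (s : String) (c1 : String) (c2 : String) : List Int :=
  let fin := s.toList.foldl (hsStep c1 c2) ([], 0)
  if fin.2 > 0 then fin.1 ++ [fin.2] else fin.1

-- ===== PRECONDITION & SPEC =====
def Spec_homosubstrings (s : String) (c1 : String) (c2 : String) (out : List Int) : Prop := out = homosubstrings_alt s c1 c2
instance (s : String) (c1 : String) (c2 : String) (out : List Int) : Decidable (Spec_homosubstrings s c1 c2 out) := by unfold Spec_homosubstrings; infer_instance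

-- ===== CLAIM (what is proved, stated in full; the proofs are below) =====
def Claim_equal_homosubstrings : Prop := ∀ (s : String) (c1 : String) (c2 : String), Dom_homosubstrings s c1 c2 → Spec_homosubstrings s c1 c2 (homosubstrings s c1 c2)

-- ===== LEMMAS AND PROOFS =====

-- separator indices of cs starting at index i
def hsIdxs (c1 c2 : String) : List Char → Int → List Int
  | [], _ => []
  | ch :: t, i =>
    (if [ch] ≠ c1.toList ∧ [ch] ≠ c2.toList then [i] else []) ++ hsIdxs c1 c2 t (i + 1)

-- gaps between consecutive elements of (prev :: xs ++ [n]), each minus 1, nonzero ones kept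
def hsGaps (prev : Int) (xs : List Int) (n : Int) : List Int :=
  match xs with
  | [] => if n - prev - 1 ≠ 0 then [n - prev - 1] else []
  | x :: rest => (if x - prev - 1 ≠ 0 then [x - prev - 1] else []) ++ hsGaps x rest n

-- B's pass with the result accumulator factored out, plus final flush
def hsRun (c1 c2 : String) (cs : List Char) (run : Int) : List Int :=
  let fin := cs.foldl (hsStep c1 c2) ([], run)
  if fin.2 > 0 then fin.1 ++ [fin.2] else fin.1

theorem hsSpacesLoop_spec (c1 c2 : String) (cs : List Char) (i : Int) (acc : List Int) (f : Bool) :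
    hsSpacesLoop c1 c2 cs i acc f =
      (acc ++ hsIdxs c1 c2 cs i, f || !(hsIdxs c1 c2 cs i).isEmpty) := by
  induction cs generalizing i acc f with
  | nil => simp [hsSpacesLoop, hsIdxs]
  | cons ch t ih =>
    by_cases h : [ch] ≠ c1.toList ∧ [ch] ≠ c2.toList
    · simp [hsSpacesLoop, hsIdxs, h, ih]
    · simp [hsSpacesLoop, hsIdxs, h, ih]

theorem hsGapLoop_spec (prev : Int) (xs : List Int) (n : Int) :
    hsGaps prev xs n =
      (hsGapLoop prev xs).1 ++
        (if n - (hsGapLoop prev xs).2 - 1 ≠ 0 then [n - (hsGapLoop prev xs).2 - 1] else []) := by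
  induction xs generalizing prev with
  | nil => simp [hsGaps, hsGapLoop]
  | cons x rest ih => simp [hsGaps, hsGapLoop, ih x]

theorem hsFoldl_acc (c1 c2 : String) (cs : List Char) (acc : List Int) (run : Int) :
    cs.foldl (hsStep c1 c2) (acc, run) =
      (acc ++ (cs.foldl (hsStep c1 c2) ([], run)).1, (cs.foldl (hsStep c1 c2) ([], run)).2) := by
  induction cs generalizing acc run with
  | nil => simp
  | cons ch t ih =>
    by_cases h : [ch] = c1.toList ∨ [ch] = c2.toList
    · simp only [List.foldl_cons, hsStep, if_pos h]
      rw [ih acc, ih []]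
    · simp only [List.foldl_cons, hsStep, if_neg h, List.nil_append]
      by_cases hr : run > 0
      · simp only [if_pos hr]
        rw [ih (acc ++ [run]), ih [run]]
        simp
      · simp only [if_neg hr]
        rw [ih acc, ih []]

theorem hsRun_cons_sep (c1 c2 : String) (ch : Char) (t : List Char) (run : Int)
    (h : ¬([ch] = c1.toList ∨ [ch] = c2.toList)) :
    hsRun c1 c2 (ch :: t) run = (if run > 0 then [run] else []) ++ hsRun c1 c2 t 0 := by
  unfold hsRun
  simp only [List.foldl_cons, hsStep, if_neg h, List.nil_append]
  by_cases hr : run > 0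
  · simp only [if_pos hr]
    rw [hsFoldl_acc c1 c2 t [run] 0]
    by_cases h2 : (t.foldl (hsStep c1 c2) ([], 0)).2 > 0 <;> simp [h2]
  · simp [hr]

theorem hsRun_cons_keep (c1 c2 : String) (ch : Char) (t : List Char) (run : Int)
    (h : [ch] = c1.toList ∨ [ch] = c2.toList) :
    hsRun c1 c2 (ch :: t) run = hsRun c1 c2 t (run + 1) := by
  unfold hsRun
  simp [hsStep, h]

-- main invariant: A's gap list over the separator indices equals B's running pass
theorem hs_main (c1 c2 : String) (cs : List Char) (i prev : Int) (h : prev < i) :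
    hsGaps prev (hsIdxs c1 c2 cs i) (i + (cs.length : Int)) = hsRun c1 c2 cs (i - prev - 1) := by
  induction cs generalizing i prev with
  | nil =>
    simp only [hsIdxs, hsGaps, List.length_nil, Int.natCast_zero, add_zero, hsRun, List.foldl_nil]
    split_ifs with h1 h2 h2 <;> (try simp) <;> omega
  | cons ch t ih =>
    by_cases hsep : [ch] ≠ c1.toList ∧ [ch] ≠ c2.toList
    · rw [hsRun_cons_sep c1 c2 ch t _ (by tauto)]
      simp only [hsIdxs, if_pos hsep, List.cons_append, List.nil_append, hsGaps]
      have hn : i + ((ch :: t).length : Int) = (i + 1) + (t.length : Int) := by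
        simp; omega
      rw [hn, ih (i + 1) i (by omega)]
      simp only [add_sub_cancel_left, sub_self]
      congr 1
      split_ifs with h1 h2 h2 <;> first | rfl | omega
    · rw [hsRun_cons_keep c1 c2 ch t _ (by tauto)]
      simp only [hsIdxs, if_neg hsep, List.nil_append]
      have hn : i + ((ch :: t).length : Int) = (i + 1) + (t.length : Int) := by
        simp; omega
      rw [hn, ih (i + 1) prev (by omega)]
      congr 1
      omega

-- ===== VERDICT (by name: the statement is the Claim_ definition above) =====
theorem homosubstrings_spec : Claim_equal_homosubstrings := by
  intro s c1 c2 _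
  show homosubstrings s c1 c2 = homosubstrings_alt s c1 c2
  have halt : homosubstrings_alt s c1 c2 = hsRun c1 c2 s.toList 0 := rfl
  have hmain := hs_main c1 c2 s.toList 0 (-1) (by omega)
  rw [halt, ← (by norm_num : (0 : Int) - (-1) - 1 = 0), ← hmain]
  unfold homosubstrings
  rw [hsSpacesLoop_spec]
  simp only [List.nil_append, Bool.false_or, zero_add]
  cases hidx : hsIdxs c1 c2 s.toList 0 with
  | nil =>
    simp only [List.isEmpty_nil, Bool.not_true, Bool.false_eq_true, if_false, hsGaps]
    split_ifs with h1 h2 h2 <;> first | rfl | omega | (congr 1; omega)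
  | cons s0 rest =>
    simp only [List.isEmpty_cons, Bool.not_false, if_true, hsGaps]
    rw [hsGapLoop_spec s0 rest (s.toList.length : Int), List.append_assoc]
    congr 1
    · have e : s0 - -1 - 1 = s0 := by omega
      rw [e]
    · congr 1
      have e2 : (s.toList.length : Int) - 1 - (hsGapLoop s0 rest).2
          = (s.toList.length : Int) - (hsGapLoop s0 rest).2 - 1 := by omega
      rw [e2]
      split_ifs with h1 h2 h2 <;> first | rfl | omega
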